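-- pv_equiv track=rewrite | github.com/sungguenja/other_Algorithmus_problem | baekjoon_21610_마법사_상어와_비바라기.py | getArrivalPosition
-- ===== SOURCE A (Python) =====
-- di = [0,0,-1,-1,-1,0,1,1,1]
--
-- dj = [0,-1,-1,0,1,1,1,0,-1]
--
-- def getArrivalPosition(position,now_moving,size):
--     direction,move_length = now_moving
--     if move_length >= size:
--         move_length = move_length % size
--     i,j = position
--     ni = i + (di[direction] * move_length)
--     nj = j + (dj[direction] * move_length)
--     while ni < 0 or ni >= size:
--         if ni < 0:
--             ni += size
--         elif ni >= size:
--             ni -= size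
--     while nj < 0 or nj >= size:
--         if nj < 0:
--             nj += size
--         elif nj >= size:
--             nj -= size
--     return [ni,nj]
-- ===== SOURCE B (Python) =====
-- di = [0,0,-1,-1,-1,0,1,1,1]
--
-- dj = [0,-1,-1,0,1,1,1,0,-1]
--
-- def getArrivalPosition(position, now_moving, size):
--     direction, move_length = now_moving
--     i, j = position
--     return [(i + di[direction] * move_length) % size,
--             (j + dj[direction] * move_length) % size]
-- ===== Notes on version B (the rewrite author's own statement) =====
-- stated objective: simpler
-- what changed: Replaced the two step-by-step wrapping while-loops (and the pre-reduction of move_length) with a single closed-form Python modulo per coordinate.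
import Mathlib
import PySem

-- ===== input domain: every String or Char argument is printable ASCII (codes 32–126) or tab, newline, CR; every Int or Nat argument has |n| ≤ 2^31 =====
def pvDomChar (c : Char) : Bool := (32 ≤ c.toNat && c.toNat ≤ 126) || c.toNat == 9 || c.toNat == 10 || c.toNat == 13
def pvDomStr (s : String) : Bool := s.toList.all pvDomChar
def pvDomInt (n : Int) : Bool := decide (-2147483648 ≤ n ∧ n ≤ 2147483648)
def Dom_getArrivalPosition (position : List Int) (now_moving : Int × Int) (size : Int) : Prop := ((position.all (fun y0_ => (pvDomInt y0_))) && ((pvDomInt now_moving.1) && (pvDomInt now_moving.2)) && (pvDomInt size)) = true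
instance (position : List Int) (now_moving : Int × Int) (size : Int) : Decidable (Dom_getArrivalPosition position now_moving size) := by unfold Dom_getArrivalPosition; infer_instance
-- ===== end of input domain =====

-- B replaces A's two step-by-step wrapping while-loops by one closed-form Python modulo per coordinate (simpler).

-- ===== PORT A =====
-- Source A's module constants di, dj
def pvDi : List Int := [0, 0, -1, -1, -1, 0, 1, 1, 1]
def pvDj : List Int := [0, -1, -1, 0, 1, 1, 1, 0, -1]

-- A's while-loop 'while x < 0 or x >= size: …' as fuel recursion (fuel is only a
-- totality guard; Pre_ guarantees size ≥ 1, under which x.natAbs + 1 fuel always suffices)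
def pvWrap (x size : Int) : Nat → Int
  | 0 => x
  | fuel + 1 =>
    if x < 0 then pvWrap (x + size) size fuel
    else if x ≥ size then pvWrap (x - size) size fuel
    else x

def getArrivalPosition (position : List Int) (now_moving : Int × Int) (size : Int) : List Int :=
  let direction := now_moving.1
  let move_length := now_moving.2
  let move_length := if move_length ≥ size then PySem.Int.mod move_length size else move_length
  match position, PySem.List.pyGet? pvDi direction, PySem.List.pyGet? pvDj direction with
  | [i, j], some d1, some d2 =>
    let ni := i + d1 * move_length
    let nj := j + d2 * move_length
    [pvWrap ni size (ni.natAbs + 1), pvWrap nj size (nj.natAbs + 1)]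
  | _, _, _ => []   -- unreachable under Pre_ (A raises on these inputs)

-- ===== PORT B =====
-- Source B's own copies of the module constants di, dj
def pvDiB : List Int := [0, 0, -1, -1, -1, 0, 1, 1, 1]
def pvDjB : List Int := [0, -1, -1, 0, 1, 1, 1, 0, -1]

def getArrivalPosition_alt (position : List Int) (now_moving : Int × Int) (size : Int) : List Int :=
  let direction := now_moving.1
  let move_length := now_moving.2
  -- guard = exactly the inputs where Source B raises (bad unpack / IndexError); no match, library lookups
  if position.length == 2 && (PySem.List.pyGet? pvDiB direction).isSome then
    let i := position.headD 0
    let j := position.tail.headD 0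
    let d1 := (PySem.List.pyGet? pvDiB direction).getD 0
    let d2 := (PySem.List.pyGet? pvDjB direction).getD 0
    [PySem.Int.mod (i + d1 * move_length) size, PySem.Int.mod (j + d2 * move_length) size]
  else []   -- unreachable under Pre_

-- ===== PRECONDITION & SPEC =====
-- Pre_ excludes exactly the inputs on which A does not return normally: a position that is
-- not a pair (unpacking raises), a direction outside the 9-entry delta tables (IndexError),
-- and size ≤ 0 (ZeroDivisionError on '%' for size = 0, or a diverging while-loop).
def Pre_getArrivalPosition (position : List Int) (now_moving : Int × Int) (size : Int) : Prop :=
  position.length = 2 ∧ 1 ≤ size ∧ -9 ≤ now_moving.1 ∧ now_moving.1 ≤ 8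
instance (position : List Int) (now_moving : Int × Int) (size : Int) : Decidable (Pre_getArrivalPosition position now_moving size) := by unfold Pre_getArrivalPosition; infer_instance

def pvWitness_getArrivalPosition : List Int × (Int × Int) × Int := ([2, 3], (4, 7), 5)

def Spec_getArrivalPosition (position : List Int) (now_moving : Int × Int) (size : Int) (out : List Int) : Prop := out = getArrivalPosition_alt position now_moving size
instance (position : List Int) (now_moving : Int × Int) (size : Int) (out : List Int) : Decidable (Spec_getArrivalPosition position now_moving size out) := by unfold Spec_getArrivalPosition; infer_instance

-- ===== CLAIM (what is proved, stated in full; the proofs are below) =====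
def Claim_equal_getArrivalPosition : Prop := ∀ (position : List Int) (now_moving : Int × Int) (size : Int), Dom_getArrivalPosition position now_moving size → Pre_getArrivalPosition position now_moving size → Spec_getArrivalPosition position now_moving size (getArrivalPosition position now_moving size)

-- ===== LEMMAS AND PROOFS =====

theorem pvWrap_succ (x size : Int) (fuel : Nat) :
    pvWrap x size (fuel + 1) =
      if x < 0 then pvWrap (x + size) size fuel
      else if x ≥ size then pvWrap (x - size) size fuel
      else x := rfl

theorem pvWrap_in_range (x size : Int) (fuel : Nat) (h0 : 0 ≤ x) (h1 : x < size) :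
    pvWrap x size (fuel + 1) = x := by
  rw [pvWrap_succ, if_neg (by omega), if_neg (by omega)]

theorem pvWrap_eq_emod (size : Int) (hs : 1 ≤ size) :
    ∀ (fuel : Nat) (x : Int), x.natAbs < fuel → pvWrap x size fuel = x % size := by
  intro fuel
  induction fuel with
  | zero => intro x h; omega
  | succ n ih =>
    intro x h
    have hadd : (x + size) % size = x % size := by
      rw [show x + size = x + size * 1 by ring, Int.add_mul_emod_self_left]
    have hsub : (x - size) % size = x % size := by
      rw [show x - size = x + size * (-1) by ring, Int.add_mul_emod_self_left]
    by_cases hx : x < 0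
    · rw [pvWrap_succ, if_pos hx]
      by_cases h2 : x + size < 0
      · rw [ih (x + size) (by omega), hadd]
      · obtain ⟨m, rfl⟩ : ∃ m, n = m + 1 := ⟨n - 1, by omega⟩
        rw [pvWrap_in_range _ _ m (by omega) (by omega), ← hadd,
          Int.emod_eq_of_lt (by omega) (by omega)]
    · by_cases hx2 : x ≥ size
      · rw [pvWrap_succ, if_neg hx, if_pos hx2]
        by_cases h2 : x - size ≥ size
        · rw [ih (x - size) (by omega), hsub]
        · rcases n with _ | m
          · omega
          · rw [pvWrap_in_range _ _ m (by omega) (by omega), ← hsub,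
              Int.emod_eq_of_lt (by omega) (by omega)]
      · rw [pvWrap_in_range _ _ n (by omega) (by omega),
          Int.emod_eq_of_lt (by omega) (by omega)]

-- wrapping the (possibly pre-reduced) displacement equals one closed-form modulo
theorem pvWrap_key (i c ml size : Int) (hs : 1 ≤ size) (ml' : Int)
    (hml : ml' = if ml ≥ size then PySem.Int.mod ml size else ml) :
    pvWrap (i + c * ml') size ((i + c * ml').natAbs + 1) =
      PySem.Int.mod (i + c * ml) size := by
  have hpos : (0:Int) < size := by omega
  rw [pvWrap_eq_emod size hs _ _ (by omega), PySem.Int.mod_eq_emod_of_pos hpos]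
  subst hml
  split
  · rw [PySem.Int.mod_eq_emod_of_pos hpos]
    have h1 : Int.ModEq size (ml % size) ml := Int.emod_emod_of_dvd ml dvd_rfl
    exact Int.ModEq.add_left i (Int.ModEq.mul_left c h1)
  · rfl

theorem pvGet_pair (position : List Int) (h : position.length = 2) :
    ∃ i j, position = [i, j] := by
  match position, h with
  | [i, j], _ => exact ⟨i, j, rfl⟩

theorem pvGet_some (xs : List Int) (d : Int) (hlen : xs.length = 9)
    (h1 : -9 ≤ d) (h2 : d ≤ 8) : ∃ v, PySem.List.pyGet? xs d = some v := by
  cases h : PySem.List.pyGet? xs d with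
  | some v => exact ⟨v, rfl⟩
  | none =>
    rw [PySem.List.pyGet?_eq_none_iff] at h
    exact absurd (by rw [hlen]; constructor <;> omega) h

-- ===== VERDICT (by name: the statement is the Claim_ definition above) =====
theorem getArrivalPosition_spec : Claim_equal_getArrivalPosition := by
  intro position now_moving size _ hpre
  obtain ⟨hlen, hs, hd1, hd2⟩ := hpre
  obtain ⟨i, j, rfl⟩ := pvGet_pair position hlen
  obtain ⟨d, ml⟩ := now_moving
  simp only at hd1 hd2
  obtain ⟨v1, hv1⟩ := pvGet_some pvDi d rfl hd1 hd2
  obtain ⟨v2, hv2⟩ := pvGet_some pvDj d rfl hd1 hd2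
  have hv1' : PySem.List.pyGet? pvDiB d = some v1 := hv1
  have hv2' : PySem.List.pyGet? pvDjB d = some v2 := hv2
  have hB : getArrivalPosition_alt [i, j] (d, ml) size =
      [PySem.Int.mod (i + v1 * ml) size, PySem.Int.mod (j + v2 * ml) size] := by
    unfold getArrivalPosition_alt
    simp only [hv1', hv2']
    rfl
  unfold Spec_getArrivalPosition
  rw [hB]
  unfold getArrivalPosition
  simp only [hv1, hv2, List.cons.injEq, and_true]
  exact ⟨pvWrap_key i v1 ml size hs _ rfl, pvWrap_key j v2 ml size hs _ rfl⟩
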